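-- pv_equiv track=rewrite | github.com/SCAI-BIO/ad-mapper | backend/ai_mapper/tests/baseline.py | find_matching_substrings
-- ===== SOURCE A (Python) =====
-- def find_matching_substrings(sentence_a, sentence_b, substring_length):
--     matching_substrings = set()
--     sentence_a_length = len(sentence_a)
--     sentence_b_length = len(sentence_b)
--
--     if substring_length > sentence_a_length or substring_length > sentence_b_length:
--         raise ValueError("Substring length cannot be greater than the length of either sentence.")
--
--     for i in range(sentence_a_length - substring_length + 1):
--         substring_a = sentence_a[i:i + substring_length]
--         if substring_a in sentence_b:
--             matching_substrings.add(substring_a)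
--
--     return len(matching_substrings)
-- ===== SOURCE B (Python) =====
-- def find_matching_substrings(sentence_a, sentence_b, substring_length):
--     if substring_length > len(sentence_a) or substring_length > len(sentence_b):
--         raise ValueError("Substring length cannot be greater than the length of either sentence.")
--     set_a = {sentence_a[i:i + substring_length]
--              for i in range(len(sentence_a) - substring_length + 1)}
--     set_b = {sentence_b[j:j + substring_length]
--              for j in range(len(sentence_b) - substring_length + 1)}
--     return len(set_a & set_b)
-- ===== Notes on version B (the rewrite author's own statement) =====
-- stated objective: alternative
-- what changed: Replaces the scan-A-and-test-substring-membership-in-B loop by building the set of all length-k windows of each sentence and returning the size of their set intersection.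
-- outside the precondition, e.g. on find_matching_substrings('ccbc', 'baaacbbc', -2): A returns 2, B returns 1
import Mathlib
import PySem

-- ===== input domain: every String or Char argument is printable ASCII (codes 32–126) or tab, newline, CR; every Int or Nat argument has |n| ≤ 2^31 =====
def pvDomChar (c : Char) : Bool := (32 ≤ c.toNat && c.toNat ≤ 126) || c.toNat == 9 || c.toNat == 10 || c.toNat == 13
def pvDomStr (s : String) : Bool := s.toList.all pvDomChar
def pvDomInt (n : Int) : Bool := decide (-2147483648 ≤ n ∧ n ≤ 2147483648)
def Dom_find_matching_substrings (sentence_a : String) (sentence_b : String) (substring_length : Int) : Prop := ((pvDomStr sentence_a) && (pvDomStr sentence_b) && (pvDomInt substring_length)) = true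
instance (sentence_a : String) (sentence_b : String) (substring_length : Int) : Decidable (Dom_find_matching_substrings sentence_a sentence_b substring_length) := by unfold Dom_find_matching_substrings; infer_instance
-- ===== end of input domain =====

-- B builds the sets of all length-k windows of both sentences and intersects them,
-- instead of A's scan-A-and-test-substring-membership-in-B loop (alternative decomposition, similar cost).


-- ===== PORT A =====
def find_matching_substrings (sentence_a : String) (sentence_b : String) (substring_length : Int) : Int :=
  let matching_substrings : PySem.Set String := PySem.Set.empty
  let sentence_a_length := PySem.Str.len sentence_a
  let sentence_b_length := PySem.Str.len sentence_b
  if substring_length > sentence_a_length ∨ substring_length > sentence_b_length then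
    0  -- Python raises ValueError here; excluded by Pre_
  else
    PySem.Set.len <|
      (PySem.List.pyRange 0 (sentence_a_length - substring_length + 1)).foldl
        (fun ms i =>
          let substring_a := PySem.Str.slice sentence_a (some i) (some (i + substring_length))
          if PySem.Str.isIn substring_a sentence_b then PySem.Set.add ms substring_a else ms)
        matching_substrings

-- ===== PORT B =====
def find_matching_substrings_alt (sentence_a : String) (sentence_b : String) (substring_length : Int) : Int :=
  if substring_length > PySem.Str.len sentence_a ∨ substring_length > PySem.Str.len sentence_b then
    0  -- Python raises ValueError here; excluded by Pre_
  else
    let set_a : PySem.Set String := PySem.Set.ofList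
      ((PySem.List.pyRange 0 (PySem.Str.len sentence_a - substring_length + 1)).map
        (fun i => PySem.Str.slice sentence_a (some i) (some (i + substring_length))))
    let set_b : PySem.Set String := PySem.Set.ofList
      ((PySem.List.pyRange 0 (PySem.Str.len sentence_b - substring_length + 1)).map
        (fun j => PySem.Str.slice sentence_b (some j) (some (j + substring_length))))
    PySem.Set.len (PySem.Set.inter set_a set_b)

-- ===== PRECONDITION & SPEC =====
-- A raises ValueError when substring_length exceeds either length; additionally, negative
-- substring_length is excluded as outside the natural domain of a length argument: there the
-- Python slice bound i+k wraps to the end of the string and both programs' values are accidental.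
def Pre_find_matching_substrings (sentence_a : String) (sentence_b : String) (substring_length : Int) : Prop :=
  0 ≤ substring_length ∧ substring_length ≤ PySem.Str.len sentence_a ∧ substring_length ≤ PySem.Str.len sentence_b
instance (sentence_a : String) (sentence_b : String) (substring_length : Int) : Decidable (Pre_find_matching_substrings sentence_a sentence_b substring_length) := by unfold Pre_find_matching_substrings; infer_instance

def pvWitness_find_matching_substrings : String × String × Int := ("abab", "barn", 2)

def Spec_find_matching_substrings (sentence_a : String) (sentence_b : String) (substring_length : Int) (out : Int) : Prop := out = find_matching_substrings_alt sentence_a sentence_b substring_length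
instance (sentence_a : String) (sentence_b : String) (substring_length : Int) (out : Int) : Decidable (Spec_find_matching_substrings sentence_a sentence_b substring_length out) := by unfold Spec_find_matching_substrings; infer_instance

-- ===== CLAIM (what is proved, stated in full; the proofs are below) =====
def Claim_equal_find_matching_substrings : Prop := ∀ (sentence_a : String) (sentence_b : String) (substring_length : Int), Dom_find_matching_substrings sentence_a sentence_b substring_length → Pre_find_matching_substrings sentence_a sentence_b substring_length → Spec_find_matching_substrings sentence_a sentence_b substring_length (find_matching_substrings sentence_a sentence_b substring_length)

-- ===== LEMMAS AND PROOFS =====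

-- a length-K window of l is an infix of l
theorem pv_window_infix (l : List Char) (n m : Nat) : (l.drop n).take m <:+: l :=
  ((l.drop n).take_prefix m).isInfix.trans (l.drop_suffix n).isInfix

-- a list of length K is an infix of bl iff it is one of bl's length-K windows
theorem pv_infix_iff_window (x bl : List Char) (K : Nat) (hx : x.length = K) (hK : K ≤ bl.length) :
    x <:+: bl ↔ ∃ m ∈ List.range (bl.length - K + 1), (bl.drop m).take K = x := by
  constructor
  · rintro ⟨l₁, l₂, h⟩
    refine ⟨l₁.length, ?_, ?_⟩
    · have := congrArg List.length h
      simp [hx] at this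
      simp [List.mem_range]
      omega
    · rw [← h, List.append_assoc, List.drop_left, ← hx, List.take_left]
  · rintro ⟨m, -, h⟩
    rw [← h]; exact pv_window_infix bl m K

-- the main equivalence, phrased on the ports
theorem pv_main (a b : String) (k : Int) (h0 : 0 ≤ k) (ha : k ≤ PySem.Str.len a)
    (hb : k ≤ PySem.Str.len b) :
    find_matching_substrings a b k = find_matching_substrings_alt a b k := by
  have hguard : ¬ (k > PySem.Str.len a ∨ k > PySem.Str.len b) := by omega
  obtain ⟨K, rfl⟩ : ∃ K : Nat, k = (K : Int) := ⟨k.toNat, (Int.toNat_of_nonneg h0).symm⟩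
  have hlen : ∀ s : String, PySem.Str.len s = (s.toList.length : Int) := fun s => by
    simp [PySem.Str.len_eq]
  have hKa : K ≤ a.toList.length := by rw [hlen] at ha; exact_mod_cast ha
  have hKb : K ≤ b.toList.length := by rw [hlen] at hb; exact_mod_cast hb
  have hrange : ∀ s : String, K ≤ s.toList.length →
      PySem.Str.len s - (K : Int) + 1 = ((s.toList.length - K + 1 : Nat) : Int) := by
    intro s hs; rw [hlen]; push_cast [hs]; ring
  -- the window at index n of a string s
  have hslice : ∀ (s : String) (n : Nat),
      PySem.Str.slice s (some (n : Int)) (some ((n : Int) + (K : Int)))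
        = String.ofList ((s.toList.drop n).take K) := by
    intro s n
    apply String.toList_inj.mp
    simp [PySem.Str.toList_slice, PySem.List.slice_natCast_add]
  simp only [find_matching_substrings, find_matching_substrings_alt, if_neg hguard,
    hrange a hKa, hrange b hKb, PySem.List.pyRange_zero_natCast, List.foldl_map, List.map_map,
    Function.comp_def, hslice]
  -- A's loop is ofList of the filtered window list
  rw [← List.foldl_map (f := fun n => String.ofList ((a.toList.drop n).take K))
    (g := fun ms s => if PySem.Str.isIn s b then PySem.Set.add ms s else ms),
    ← List.foldl_filter,
    show (PySem.Set.empty : PySem.Set String) = ([] : PySem.Set String) from rfl,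
    ← PySem.Set.ofList_eq_foldl]
  -- B's intersection is a filter of set_a
  simp only [PySem.Set.inter, PySem.Set.len]
  congr 1
  -- both sides are nodup lists with the same members
  apply List.Perm.length_eq
  rw [List.perm_ext_iff_of_nodup (PySem.Set.nodup_ofList _) ((PySem.Set.nodup_ofList _).filter _)]
  intro x
  simp only [PySem.Set.mem_ofList, List.mem_filter, PySem.Set.mem_ofList]
  refine and_congr_right fun hx => ?_
  -- for a window x of a: 'x in b' iff x is among b's windows
  obtain ⟨n, hn, rfl⟩ := List.mem_map.mp hx
  rw [List.mem_range] at hn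
  have hxlen : ((a.toList.drop n).take K).length = K := by
    rw [List.length_take, List.length_drop]; omega
  have hiff := pv_infix_iff_window ((a.toList.drop n).take K) b.toList K hxlen hKb
  rw [PySem.Str.isIn_iff_infix, PySem.Set.contains_iff, PySem.Set.mem_ofList]
  have htl : (String.ofList ((a.toList.drop n).take K)).toList = (a.toList.drop n).take K := by
    simp
  rw [htl, hiff]
  simp only [List.mem_map]
  constructor
  · rintro ⟨m, hm, h⟩
    exact ⟨m, hm, congrArg String.ofList h⟩
  · rintro ⟨m, hm, h⟩
    refine ⟨m, hm, ?_⟩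
    have := congrArg String.toList h
    simpa using this

-- ===== VERDICT (by name: the statement is the Claim_ definition above) =====
theorem find_matching_substrings_spec : Claim_equal_find_matching_substrings := by
  intro a b k _ hpre
  unfold Spec_find_matching_substrings
  exact pv_main a b k hpre.1 hpre.2.1 hpre.2.2
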